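-- pv_equiv track=rewrite | github.com/yeongminChae/Python-Practice | 20-40/33.py | func
-- ===== SOURCE A (Python) =====
-- li = ["c=",
--       "c-",
--       "dz=",
--       "d-",
--       "lj",
--       "nj",
--       "s=",
--       "z=",]
--
-- def func(a):
--     b = 0
--     for i in li:
--         if a.count(i) >= 1:
--             b += a.count(i)
--             a = a.replace(i, "*")
--
--     for j in a:
--         if j != "*":
--             b += 1
--
--     return b
-- ===== SOURCE B (Python) =====
-- li = ["c=",
--       "c-",
--       "dz=",
--       "d-",
--       "lj",
--       "nj",
--       "s=",
--       "z=",]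
--
-- def func(a):
--     n = 0
--     i = 0
--     while i < len(a):
--         for p in li:
--             if a.startswith(p, i):
--                 n += 1
--                 i += len(p)
--                 break
--         else:
--             n += 1
--             i += 1
--     return n
-- ===== Notes on version B (the rewrite author's own statement) =====
-- stated objective: alternative
-- what changed: Replaced the eight global count()/replace() passes plus a final character scan with a single left-to-right index-pointer scan that tries the digraph/trigraph patterns at each position and counts one token per match or per single character.
-- intended difference: On strings containing '*', A silently skips every '*' character (it is A's internal replacement marker), so it returns the token count minus the number of '*'s; B counts '*' like any other ordinary character, which is the intended behaviour for a character/digraph counter. — e.g. on func("*z="): A returns 1, B returns 2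
import Mathlib
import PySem

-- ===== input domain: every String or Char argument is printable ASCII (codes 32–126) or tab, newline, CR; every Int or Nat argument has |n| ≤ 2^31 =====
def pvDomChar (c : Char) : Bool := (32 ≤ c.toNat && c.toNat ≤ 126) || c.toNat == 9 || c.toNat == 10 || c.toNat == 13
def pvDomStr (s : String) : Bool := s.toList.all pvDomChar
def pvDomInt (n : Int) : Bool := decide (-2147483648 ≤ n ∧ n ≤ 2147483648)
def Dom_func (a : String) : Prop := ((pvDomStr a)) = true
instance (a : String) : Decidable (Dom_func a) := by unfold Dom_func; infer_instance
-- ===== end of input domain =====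

-- B replaces A's eight global count()/replace() passes plus a final scan by one left-to-right
-- index-pointer scan (objective: alternative); on strings containing '*' the two intentionally differ (see D_func).

-- ===== PORT A =====
def liA : List String := ["c=", "c-", "dz=", "d-", "lj", "nj", "s=", "z="]

def func (a : String) : Int :=
  -- b = 0; for i in li: if a.count(i) >= 1: b += a.count(i); a = a.replace(i, "*")
  let r := liA.foldl (fun (st : Int × String) i =>
      if 1 ≤ PySem.Str.count st.2 i then
        (st.1 + (PySem.Str.count st.2 i : Int), PySem.Str.replace st.2 i "*")
      else st) ((0 : Int), a)
  -- for j in a: if j != "*": b += 1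
  r.2.toList.foldl (fun b j => if j ≠ '*' then b + 1 else b) r.1

-- ===== PORT B =====
def liB : List (List Char) := [['c','='], ['c','-'], ['d','z','='], ['d','-'], ['l','j'], ['n','j'], ['s','='], ['z','=']]

-- B's while-loop over the index pointer i, as recursion on the characters not yet scanned;
-- a.startswith(p, i) is p.isPrefixOf on the remaining characters, n += 1 / i += len(p) per step.
def altGo : List Char → Int
  | [] => 0
  | h :: t =>
    match liB.find? (fun p => p.isPrefixOf (h :: t)) with
    | some p => 1 + altGo (t.drop (p.length - 1))
    | none => 1 + altGo t
termination_by l => l.length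
decreasing_by
  · simp only [List.length_cons, List.length_drop]; omega
  · simp

def func_alt (a : String) : Int := altGo a.toList

-- ===== PRECONDITION & SPEC =====
-- On strings containing '*', A silently skips every '*' character (its internal replacement marker),
-- returning the token count minus the number of '*'s; B counts '*' like any other ordinary character,
-- which is the intended behaviour for a character/digraph counter.
def D_func (a : String) : Prop := '*' ∈ a.toList
instance (a : String) : Decidable (D_func a) := by unfold D_func; infer_instance

def Spec_func (a : String) (out : Int) : Prop := ¬ D_func a → out = func_alt a
instance (a : String) (out : Int) : Decidable (Spec_func a out) := by unfold Spec_func; infer_instance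

def pvDiffWitness_func : String := "*z="
def pvDiffWitnessOut_func : Int × Int := (1, 2)

-- ===== CLAIM (what is proved, stated in full; the proofs are below) =====
def Claim_unchanged_func : Prop := ∀ (a : String), Dom_func a → Spec_func a (func a)
def Claim_changed_func : Prop := Dom_func (pvDiffWitness_func) ∧ D_func (pvDiffWitness_func) ∧ func (pvDiffWitness_func) = pvDiffWitnessOut_func.1 ∧ func_alt (pvDiffWitness_func) = pvDiffWitnessOut_func.2 ∧ pvDiffWitnessOut_func.1 ≠ pvDiffWitnessOut_func.2
def Claim_exact_func : Prop := ∀ (a : String), Dom_func a → D_func a → func a ≠ func_alt a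

-- ===== LEMMAS AND PROOFS =====

-- proof-side greedy count/replace (the semantics of Python str.count / str.replace for a
-- nonempty needle: non-overlapping matches, scanned left to right)
def cnt (p : List Char) : List Char → Nat
  | [] => 0
  | h :: t => if p.isPrefixOf (h :: t) then cnt p (t.drop (p.length - 1)) + 1 else cnt p t
termination_by l => l.length
decreasing_by
  · simp only [List.length_cons, List.length_drop]; omega
  · simp

def rep (p n : List Char) : List Char → List Char
  | [] => []
  | h :: t => if p.isPrefixOf (h :: t) then n ++ rep p n (t.drop (p.length - 1)) else h :: rep p n t
termination_by l => l.length
decreasing_by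
  · simp only [List.length_cons, List.length_drop]; omega
  · simp

-- one pipeline stage of A, on lists: add the number of occurrences, replace each one by '*'
def stp (p : List Char) (x : Int × List Char) : Int × List Char :=
  (x.1 + (cnt p x.2 : Int), rep p ['*'] x.2)

def foldSt (ps : List (List Char)) (x : Int × List Char) : Int × List Char :=
  ps.foldl (fun x p => stp p x) x

lemma count_go_eq (p : List Char) (hp : p ≠ []) :
    ∀ (fuel : Nat) (l : List Char) (acc : Nat), l.length ≤ fuel →
      PySem.Chars.count.go p fuel l acc = acc + cnt p l := by
  intro fuel
  induction fuel with
  | zero =>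
    intro l acc hl
    have : l = [] := List.length_eq_zero_iff.mp (Nat.le_zero.mp hl)
    subst this
    simp [PySem.Chars.count.go, cnt]
  | succ n ih =>
    intro l acc hl
    match l with
    | [] => simp [PySem.Chars.count.go, cnt]
    | h :: t =>
      rw [PySem.Chars.count.go]
      by_cases hpre : p.isPrefixOf (h :: t)
      · rw [if_pos hpre]
        have hplen : 1 ≤ p.length := by
          cases p with
          | nil => exact absurd rfl hp
          | cons a b => simp
        have hdrop : (h :: t).drop p.length = t.drop (p.length - 1) := by
          cases p with
          | nil => exact absurd rfl hp
          | cons a b => simp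
        rw [hdrop, ih _ _ (by simp at hl ⊢; omega)]
        rw [cnt, if_pos hpre]
        omega
      · rw [if_neg hpre, ih _ _ (by simp at hl; omega)]
        rw [cnt, if_neg hpre]

lemma chars_count_eq (s p : List Char) (hp : p ≠ []) : PySem.Chars.count s p = cnt p s := by
  rw [PySem.Chars.count, if_neg (by simpa using hp), count_go_eq p hp s.length s 0 le_rfl]
  omega

lemma replace_go_eq (old new : List Char) (hp : old ≠ []) :
    ∀ (fuel : Nat) (l : List Char) (acc : List Char), l.length ≤ fuel →
      PySem.Chars.replace.go old new fuel l acc = acc.reverse ++ rep old new l := by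
  intro fuel
  induction fuel with
  | zero =>
    intro l acc hl
    have : l = [] := List.length_eq_zero_iff.mp (Nat.le_zero.mp hl)
    subst this
    simp [PySem.Chars.replace.go, rep]
  | succ n ih =>
    intro l acc hl
    match l with
    | [] => simp [PySem.Chars.replace.go, rep]
    | h :: t =>
      rw [PySem.Chars.replace.go]
      by_cases hpre : old.isPrefixOf (h :: t)
      · rw [if_pos hpre]
        have hdrop : (h :: t).drop old.length = t.drop (old.length - 1) := by
          cases old with
          | nil => exact absurd rfl hp
          | cons a b => simp
        rw [hdrop, ih _ _ (by simp at hl ⊢; omega)]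
        rw [rep, if_pos hpre]
        simp
      · rw [if_neg hpre, ih _ _ (by simp at hl; omega)]
        rw [rep, if_neg hpre]
        simp

lemma chars_replace_eq (s old new : List Char) (hp : old ≠ []) :
    PySem.Chars.replace s old new = rep old new s := by
  rw [PySem.Chars.replace, if_neg (by simpa using hp),
      replace_go_eq old new hp s.length s [] le_rfl]
  rfl

lemma rep_of_cnt_zero (p n : List Char) : ∀ l, cnt p l = 0 → rep p n l = l := by
  intro l
  fun_induction rep p n l with
  | case1 => intro; rfl
  | case2 h t hpre ihm =>
    intro hc
    rw [cnt, if_pos hpre] at hc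
    omega
  | case3 h t hpre ih =>
    intro hc
    rw [cnt, if_neg hpre] at hc
    rw [ih hc]

lemma rep_head? (p : List Char) (u : List Char) :
    (rep p ['*'] u).head? = u.head? ∨ (rep p ['*'] u).head? = some '*' := by
  cases u with
  | nil => left; rw [rep]
  | cons h t =>
    rw [rep]
    by_cases hpre : p.isPrefixOf (h :: t)
    · right; rw [if_pos hpre]; rfl
    · left; rw [if_neg hpre]; rfl

lemma pre2 (a b : Char) (h : Char) (v : List Char) :
    ([a, b].isPrefixOf (h :: v) = true) ↔ (h = a ∧ v.head? = some b) := by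
  rw [List.isPrefixOf_iff_prefix]
  cases v with
  | nil => simp [List.cons_prefix_cons, eq_comm]
  | cons x w => simp [List.cons_prefix_cons, eq_comm]

lemma pre3 (a b c : Char) (h : Char) (v : List Char) :
    ([a, b, c].isPrefixOf (h :: v) = true) ↔ (h = a ∧ ∃ w, v = b :: w ∧ w.head? = some c) := by
  rw [List.isPrefixOf_iff_prefix]
  cases v with
  | nil => simp [List.cons_prefix_cons]
  | cons x w =>
    cases w with
    | nil => simp [List.cons_prefix_cons]
    | cons y ww => simp [List.cons_prefix_cons, eq_comm]

lemma Qpres2 (a b : Char) (hb : b ≠ '*') (p : List Char) (hc : Char) (u : List Char)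
    (H : ¬ [a, b].isPrefixOf (hc :: u) = true) :
    ¬ [a, b].isPrefixOf (hc :: rep p ['*'] u) = true := by
  intro hpre
  rw [pre2] at hpre
  obtain ⟨h1, h2⟩ := hpre
  rcases rep_head? p u with hh | hh
  · rw [hh] at h2
    exact H (by rw [pre2]; exact ⟨h1, h2⟩)
  · rw [hh] at h2
    exact hb (by injection h2 with h; exact h.symm) -- some b = some '*'

lemma Qpres (p : List Char) (hc : Char) (u : List Char)
    (H : ∀ q ∈ liB, ¬ q.isPrefixOf (hc :: u) = true) :
    ∀ q ∈ liB, ¬ q.isPrefixOf (hc :: rep p ['*'] u) = true := by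
  intro q hq
  fin_cases hq
  · exact Qpres2 'c' '=' (by decide) p hc u (H _ (by simp [liB]))
  · exact Qpres2 'c' '-' (by decide) p hc u (H _ (by simp [liB]))
  · -- dz=
    intro hpre
    rw [pre3] at hpre
    obtain ⟨h1, w, hw, hw2⟩ := hpre
    cases u with
    | nil => rw [rep] at hw; exact absurd hw (by simp)
    | cons x t =>
      rw [rep] at hw
      by_cases hx : p.isPrefixOf (x :: t)
      · rw [if_pos hx] at hw
        exact absurd (List.head_eq_of_cons_eq hw) (by decide)
      · rw [if_neg hx] at hw
        have hx' : x = 'z' := List.head_eq_of_cons_eq hw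
        have hw' : w = rep p ['*'] t := (List.tail_eq_of_cons_eq hw).symm
        rcases rep_head? p t with hh | hh
        · subst hw'
          rw [hh] at hw2
          cases t with
          | nil => simp at hw2
          | cons y tt =>
            have : y = '=' := by injection hw2
            subst this hx' h1
            exact H ['d','z','='] (by simp [liB]) ((pre3 'd' 'z' '=' 'd' ('z'::'='::tt)).mpr ⟨rfl, '='::tt, rfl, rfl⟩)
        · subst hw'
          rw [hh] at hw2
          exact absurd (by injection hw2 with h; exact h.symm) (by decide : ¬ ('=' = '*'))
  · exact Qpres2 'd' '-' (by decide) p hc u (H _ (by simp [liB]))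
  · exact Qpres2 'l' 'j' (by decide) p hc u (H _ (by simp [liB]))
  · exact Qpres2 'n' 'j' (by decide) p hc u (H _ (by simp [liB]))
  · exact Qpres2 's' '=' (by decide) p hc u (H _ (by simp [liB]))
  · exact Qpres2 'z' '=' (by decide) p hc u (H _ (by simp [liB]))

lemma npre2h {a b x : Char} {l : List Char} (h : x ≠ a) : [a,b].isPrefixOf (x::l) = false := by
  rw [Bool.eq_false_iff]
  intro hp
  exact h ((pre2 a b x l).mp hp).1

lemma npre22 {a b x y : Char} {l : List Char} (h : ¬(x = a ∧ y = b)) :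
    [a,b].isPrefixOf (x::y::l) = false := by
  rw [Bool.eq_false_iff]
  intro hp
  obtain ⟨h1, h2⟩ := (pre2 a b x (y::l)).mp hp
  exact h ⟨h1, by injection h2⟩

lemma npre3h {a b c x : Char} {l : List Char} (h : x ≠ a) : [a,b,c].isPrefixOf (x::l) = false := by
  rw [Bool.eq_false_iff]
  intro hp
  rw [List.isPrefixOf_iff_prefix, List.cons_prefix_cons] at hp
  exact h hp.1.symm

lemma npre32 {a b c x y : Char} {l : List Char} (h : ¬(x = a ∧ y = b)) :
    [a,b,c].isPrefixOf (x::y::l) = false := by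
  rw [Bool.eq_false_iff]
  intro hp
  rw [List.isPrefixOf_iff_prefix, List.cons_prefix_cons, List.cons_prefix_cons] at hp
  exact h ⟨hp.1.symm, hp.2.1.symm⟩

lemma stp_skip1 (q : List Char) (x : Char) {u : List Char} {b : Int}
    (h1 : q.isPrefixOf (x::u) = false) :
    stp q (b, x::u) = (b + (cnt q u : Int), x :: rep q ['*'] u) := by
  unfold stp
  rw [cnt, if_neg (by simp [h1]), rep, if_neg (by simp [h1])]

lemma stp_skip2 (q : List Char) (x y : Char) {u : List Char} {b : Int}
    (h1 : q.isPrefixOf (x::y::u) = false) (h2 : q.isPrefixOf (y::u) = false) :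
    stp q (b, x::y::u) = (b + (cnt q u : Int), x :: y :: rep q ['*'] u) := by
  unfold stp
  rw [cnt, if_neg (by simp [h1]), cnt, if_neg (by simp [h2]),
      rep, if_neg (by simp [h1]), rep, if_neg (by simp [h2])]

lemma stp_skip3 (q : List Char) (x y z : Char) {u : List Char} {b : Int}
    (h1 : q.isPrefixOf (x::y::z::u) = false) (h2 : q.isPrefixOf (y::z::u) = false)
    (h3 : q.isPrefixOf (z::u) = false) :
    stp q (b, x::y::z::u) = (b + (cnt q u : Int), x :: y :: z :: rep q ['*'] u) := by
  unfold stp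
  rw [cnt, if_neg (by simp [h1]), cnt, if_neg (by simp [h2]), cnt, if_neg (by simp [h3]),
      rep, if_neg (by simp [h1]), rep, if_neg (by simp [h2]), rep, if_neg (by simp [h3])]

lemma stp_hit2 (x y : Char) {u : List Char} {b : Int} :
    stp [x,y] (b, x::y::u) = (b + (cnt [x,y] u : Int) + 1, '*' :: rep [x,y] ['*'] u) := by
  have hp : [x,y].isPrefixOf (x::y::u) = true := by
    rw [pre2]; exact ⟨rfl, rfl⟩
  unfold stp
  rw [cnt, if_pos hp, rep, if_pos hp]
  simp
  ring

lemma stp_hit3 (x y z : Char) {u : List Char} {b : Int} :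
    stp [x,y,z] (b, x::y::z::u) = (b + (cnt [x,y,z] u : Int) + 1, '*' :: rep [x,y,z] ['*'] u) := by
  have hp : [x,y,z].isPrefixOf (x::y::z::u) = true := by
    rw [List.isPrefixOf_iff_prefix]
    exact ⟨u, rfl⟩
  unfold stp
  rw [cnt, if_pos hp, rep, if_pos hp]
  simp
  ring

lemma fold_block (p : List Char) (hp : p ∈ liB) :
    ∀ (u : List Char) (b : Int),
      foldSt liB (b, p ++ u) = ((foldSt liB (b, u)).1 + 1, '*' :: (foldSt liB (b, u)).2) := by
  fin_cases hp <;> intro u b <;>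
    simp only [foldSt, liB, List.foldl, List.cons_append, List.nil_append]
  case _ =>  -- k = 0
    rw [stp_hit2 'c' '=',
        stp_skip1 ['c','-'] '*' (npre2h (by decide)),
        stp_skip1 ['d','z','='] '*' (npre3h (by decide)),
        stp_skip1 ['d','-'] '*' (npre2h (by decide)),
        stp_skip1 ['l','j'] '*' (npre2h (by decide)),
        stp_skip1 ['n','j'] '*' (npre2h (by decide)),
        stp_skip1 ['s','='] '*' (npre2h (by decide)),
        stp_skip1 ['z','='] '*' (npre2h (by decide))]
    simp only [stp, Prod.mk.injEq]
    refine ⟨by ring, by simp⟩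
  case _ =>  -- k = 1
    rw [stp_skip2 ['c','='] 'c' '-' (npre22 (by decide)) (npre2h (by decide)),
        stp_hit2 'c' '-',
        stp_skip1 ['d','z','='] '*' (npre3h (by decide)),
        stp_skip1 ['d','-'] '*' (npre2h (by decide)),
        stp_skip1 ['l','j'] '*' (npre2h (by decide)),
        stp_skip1 ['n','j'] '*' (npre2h (by decide)),
        stp_skip1 ['s','='] '*' (npre2h (by decide)),
        stp_skip1 ['z','='] '*' (npre2h (by decide))]
    simp only [stp, Prod.mk.injEq]
    refine ⟨by ring, by simp⟩
  case _ =>  -- k = 2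
    rw [stp_skip3 ['c','='] 'd' 'z' '=' (npre2h (by decide)) (npre2h (by decide)) (npre2h (by decide)),
        stp_skip3 ['c','-'] 'd' 'z' '=' (npre2h (by decide)) (npre2h (by decide)) (npre2h (by decide)),
        stp_hit3 'd' 'z' '=',
        stp_skip1 ['d','-'] '*' (npre2h (by decide)),
        stp_skip1 ['l','j'] '*' (npre2h (by decide)),
        stp_skip1 ['n','j'] '*' (npre2h (by decide)),
        stp_skip1 ['s','='] '*' (npre2h (by decide)),
        stp_skip1 ['z','='] '*' (npre2h (by decide))]
    simp only [stp, Prod.mk.injEq]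
    refine ⟨by ring, by simp⟩
  case _ =>  -- k = 3
    rw [stp_skip2 ['c','='] 'd' '-' (npre2h (by decide)) (npre2h (by decide)),
        stp_skip2 ['c','-'] 'd' '-' (npre2h (by decide)) (npre2h (by decide)),
        stp_skip2 ['d','z','='] 'd' '-' (npre32 (by decide)) (npre3h (by decide)),
        stp_hit2 'd' '-',
        stp_skip1 ['l','j'] '*' (npre2h (by decide)),
        stp_skip1 ['n','j'] '*' (npre2h (by decide)),
        stp_skip1 ['s','='] '*' (npre2h (by decide)),
        stp_skip1 ['z','='] '*' (npre2h (by decide))]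
    simp only [stp, Prod.mk.injEq]
    refine ⟨by ring, by simp⟩
  case _ =>  -- k = 4
    rw [stp_skip2 ['c','='] 'l' 'j' (npre2h (by decide)) (npre2h (by decide)),
        stp_skip2 ['c','-'] 'l' 'j' (npre2h (by decide)) (npre2h (by decide)),
        stp_skip2 ['d','z','='] 'l' 'j' (npre3h (by decide)) (npre3h (by decide)),
        stp_skip2 ['d','-'] 'l' 'j' (npre2h (by decide)) (npre2h (by decide)),
        stp_hit2 'l' 'j',
        stp_skip1 ['n','j'] '*' (npre2h (by decide)),
        stp_skip1 ['s','='] '*' (npre2h (by decide)),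
        stp_skip1 ['z','='] '*' (npre2h (by decide))]
    simp only [stp, Prod.mk.injEq]
    refine ⟨by ring, by simp⟩
  case _ =>  -- k = 5
    rw [stp_skip2 ['c','='] 'n' 'j' (npre2h (by decide)) (npre2h (by decide)),
        stp_skip2 ['c','-'] 'n' 'j' (npre2h (by decide)) (npre2h (by decide)),
        stp_skip2 ['d','z','='] 'n' 'j' (npre3h (by decide)) (npre3h (by decide)),
        stp_skip2 ['d','-'] 'n' 'j' (npre2h (by decide)) (npre2h (by decide)),
        stp_skip2 ['l','j'] 'n' 'j' (npre2h (by decide)) (npre2h (by decide)),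
        stp_hit2 'n' 'j',
        stp_skip1 ['s','='] '*' (npre2h (by decide)),
        stp_skip1 ['z','='] '*' (npre2h (by decide))]
    simp only [stp, Prod.mk.injEq]
    refine ⟨by ring, by simp⟩
  case _ =>  -- k = 6
    rw [stp_skip2 ['c','='] 's' '=' (npre2h (by decide)) (npre2h (by decide)),
        stp_skip2 ['c','-'] 's' '=' (npre2h (by decide)) (npre2h (by decide)),
        stp_skip2 ['d','z','='] 's' '=' (npre3h (by decide)) (npre3h (by decide)),
        stp_skip2 ['d','-'] 's' '=' (npre2h (by decide)) (npre2h (by decide)),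
        stp_skip2 ['l','j'] 's' '=' (npre2h (by decide)) (npre2h (by decide)),
        stp_skip2 ['n','j'] 's' '=' (npre2h (by decide)) (npre2h (by decide)),
        stp_hit2 's' '=',
        stp_skip1 ['z','='] '*' (npre2h (by decide))]
    simp only [stp, Prod.mk.injEq]
    refine ⟨by ring, by simp⟩
  case _ =>  -- k = 7
    rw [stp_skip2 ['c','='] 'z' '=' (npre2h (by decide)) (npre2h (by decide)),
        stp_skip2 ['c','-'] 'z' '=' (npre2h (by decide)) (npre2h (by decide)),
        stp_skip2 ['d','z','='] 'z' '=' (npre3h (by decide)) (npre3h (by decide)),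
        stp_skip2 ['d','-'] 'z' '=' (npre2h (by decide)) (npre2h (by decide)),
        stp_skip2 ['l','j'] 'z' '=' (npre2h (by decide)) (npre2h (by decide)),
        stp_skip2 ['n','j'] 'z' '=' (npre2h (by decide)) (npre2h (by decide)),
        stp_skip2 ['s','='] 'z' '=' (npre2h (by decide)) (npre2h (by decide)),
        stp_hit2 'z' '=']
    simp only [stp]

lemma foldSt_cons (p : List Char) (ps : List (List Char)) (x : Int × List Char) :
    foldSt (p :: ps) x = foldSt ps (stp p x) := rfl

lemma fold_cons : ∀ (ps : List (List Char)), (∀ p ∈ ps, p ∈ liB) →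
    ∀ (hc : Char) (t : List Char) (b : Int), (∀ q ∈ liB, ¬ q.isPrefixOf (hc :: t) = true) →
      foldSt ps (b, hc :: t) = ((foldSt ps (b, t)).1, hc :: (foldSt ps (b, t)).2) := by
  intro ps
  induction ps with
  | nil => intro _ hc t b _; rfl
  | cons p ps ih =>
    intro hps hc t b H
    have hnp : p.isPrefixOf (hc :: t) = false :=
      Bool.eq_false_iff.mpr (H p (hps p (by simp)))
    rw [foldSt_cons, stp_skip1 p hc hnp,
        ih (fun q hq => hps q (by simp [hq])) hc (rep p ['*'] t) (b + (cnt p t : Int))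
          (Qpres p hc t H),
        foldSt_cons]
    rfl

lemma liB_ne_nil : ∀ p ∈ liB, p ≠ [] := by decide

lemma liB_star_count : ∀ p ∈ liB, p.count '*' = 0 := by decide

lemma master : ∀ (n : Nat) (s : List Char), s.length ≤ n →
    (foldSt liB ((0:Int), s)).1 + ((foldSt liB ((0:Int), s)).2.countP (fun c => c ≠ '*') : Int)
      = altGo s - (s.count '*' : Int) := by
  intro n
  induction n with
  | zero =>
    intro s hs
    have : s = [] := List.length_eq_zero_iff.mp (Nat.le_zero.mp hs)
    subst this
    rw [altGo]
    simp [foldSt, liB, stp, cnt, rep]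
  | succ n ih =>
    intro s hs
    match s with
    | [] =>
      rw [altGo]
      simp [foldSt, liB, stp, cnt, rep]
    | h :: t =>
      cases hfind : liB.find? (fun p => p.isPrefixOf (h :: t)) with
      | none =>
        have H : ∀ q ∈ liB, ¬ q.isPrefixOf (h :: t) = true := by
          intro q hq
          simpa using List.find?_eq_none.mp hfind q hq
        rw [altGo, hfind]
        rw [fold_cons liB (fun _ h => h) h t 0 H]
        have iht := ih t (by simp at hs; omega)
        simp only [List.countP_cons, List.count_cons, ne_eq] at iht ⊢
        by_cases hstar : h = '*'
        · simp only [hstar, not_true_eq_false, decide_false, beq_self_eq_true, if_true]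
          push_cast
          omega
        · simp only [hstar, not_false_eq_true, decide_true, if_true, beq_iff_eq]
          push_cast
          omega
      | some p =>
        have hmem : p ∈ liB := List.mem_of_find?_eq_some hfind
        have hpre : p.isPrefixOf (h :: t) = true := by
          have := List.find?_some hfind
          simpa using this
        obtain ⟨u, hu⟩ := List.isPrefixOf_iff_prefix.mp hpre
        have hpne : p ≠ [] := liB_ne_nil p hmem
        obtain ⟨a, pt, rfl⟩ : ∃ a pt, p = a :: pt := by
          cases p with
          | nil => exact absurd rfl hpne
          | cons a pt => exact ⟨a, pt, rfl⟩
        have ha : a = h := by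
          injection hu with h1 h2
        have ht : t = pt ++ u := by
          injection hu with h1 h2
          exact h2.symm
        have hdrop : t.drop ((a :: pt).length - 1) = u := by
          rw [ht]
          simp
        rw [altGo, hfind]
        simp only [hdrop]
        subst ht ha
        rw [← List.cons_append]
        rw [fold_block _ hmem u 0]
        have ihu : (foldSt liB ((0:Int), u)).1
            + ((foldSt liB ((0:Int), u)).2.countP (fun c => c ≠ '*') : Int)
            = altGo u - (u.count '*' : Int) := by
          apply ih
          have : (a :: (pt ++ u)).length ≤ n + 1 := hs
          simp at this
          omega
        have hcount : ((a :: pt) ++ u).count '*' = u.count '*' := by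
          have h0 : (a :: pt).count '*' = 0 := liB_star_count _ hmem
          rw [List.count_append, h0]
          omega
        rw [hcount]
        simp only [List.countP_cons, ne_eq] at ihu ⊢
        simp only [not_true_eq_false, decide_false]
        push_cast
        omega

lemma foldA : ∀ (ls : List String), (∀ i ∈ ls, i.toList ≠ []) → ∀ (b : Int) (s : String),
    ls.foldl (fun (st : Int × String) i =>
      if 1 ≤ PySem.Str.count st.2 i then
        (st.1 + (PySem.Str.count st.2 i : Int), PySem.Str.replace st.2 i "*")
      else st) (b, s)
    = ((foldSt (ls.map String.toList) (b, s.toList)).1,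
       String.ofList (foldSt (ls.map String.toList) (b, s.toList)).2) := by
  intro ls
  induction ls with
  | nil =>
    intro _ b s
    simp [foldSt]
  | cons i ls ih =>
    intro hls b s
    have hi : i.toList ≠ [] := hls i (by simp)
    have hcount : PySem.Str.count s i = cnt i.toList s.toList := by
      rw [PySem.Str.count, chars_count_eq _ _ hi]
    have hreplace : PySem.Str.replace s i "*" = String.ofList (rep i.toList ['*'] s.toList) := by
      rw [PySem.Str.replace, chars_replace_eq _ _ _ hi]
      rw [show "*".toList = ['*'] from by decide]
    rw [List.foldl_cons, List.map_cons, foldSt_cons]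
    by_cases hc : 1 ≤ PySem.Str.count s i
    · rw [if_pos hc, hreplace,
          ih (fun j hj => hls j (by simp [hj])) (b + (PySem.Str.count s i : Int))
            (String.ofList (rep i.toList ['*'] s.toList))]
      rw [String.toList_ofList]
      have : stp i.toList (b, s.toList) = (b + (PySem.Str.count s i : Int), rep i.toList ['*'] s.toList) := by
        rw [stp, hcount]
      rw [this]
    · rw [if_neg hc]
      rw [ih (fun j hj => hls j (by simp [hj])) b s]
      have hz : cnt i.toList s.toList = 0 := by
        rw [hcount] at hc
        omega
      have : stp i.toList (b, s.toList) = (b, s.toList) := by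
        rw [stp, hz, rep_of_cnt_zero _ _ _ hz]
        simp
      rw [this]

lemma liA_ne_nil : ∀ i ∈ liA, i.toList ≠ [] := by decide

lemma liA_map : liA.map String.toList = liB := by decide

lemma func_eq (a : String) : func a = func_alt a - (a.toList.count '*' : Int) := by
  rw [func, foldA liA liA_ne_nil 0 a, liA_map]
  rw [String.toList_ofList]
  rw [PySem.List.foldl_ite_add_one (fun x => x ≠ '*') _ _]
  exact master a.toList.length a.toList le_rfl

-- ===== VERDICT (by name: the statement is the Claim_ definition above) =====
theorem func_spec : Claim_unchanged_func := by
  intro a _ hD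
  have h0 : a.toList.count '*' = 0 := List.count_eq_zero.mpr hD
  rw [func_eq, h0]
  simp

set_option maxRecDepth 8192 in
set_option maxRecDepth 8192 in
theorem func_changed : Claim_changed_func := by
  unfold Claim_changed_func
  refine ⟨by decide, by decide, by decide, ?_, by decide⟩
  have h := func_eq "*z="
  rw [show func "*z=" = 1 by decide,
      show ("*z=".toList.count '*') = 1 by decide] at h
  show func_alt "*z=" = 2
  omega

theorem func_tight : Claim_exact_func := by
  intro a _ hD
  have h1 : 1 ≤ a.toList.count '*' := List.one_le_count_iff.mpr hD
  rw [func_eq]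
  omega
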